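-- pv_equiv track=rewrite | github.com/foo123/Contemplate | src/python/Contemplate.py | array_values
-- ===== SOURCE A (Python) =====
-- def array_keys(o):
--     if isinstance(o, (list,tuple)): return list(map(str, range(0, len(o))))
--     if isinstance(o, dict): return list(o.keys())
--     return []
--
-- def array_values(o):
--     if isinstance(o, list): return o
--     if isinstance(o, tuple): return list(o)
--     if isinstance(o, dict):
--         if is_numeric_array(o):
--             # get values in list-order by ascending index
--             v = []
--             l = len(o)
--             i = 0
--             while i < l:
--                 v.append(o[str(i)])
--                 i += 1
--             return v
--         else:
--             return list(o.values())
--     return []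
--
-- def is_numeric_array(o):
--     if isinstance(o, (list,tuple)): return True
--     if isinstance(o, dict):
--         k = array_keys(o)
--         i = 0
--         l = len(k)
--         while i < l:
--             if str(i) not in k: return False
--             i += 1
--         return True
--     return False
-- ===== SOURCE B (Python) =====
-- def array_values(o):
--     if isinstance(o, list): return o
--     if isinstance(o, tuple): return list(o)
--     if isinstance(o, dict):
--         try:
--             return [o[str(i)] for i in range(len(o))]
--         except KeyError:
--             return list(o.values())
--     return []
-- ===== Notes on version B (the rewrite author's own statement) =====
-- stated objective: simpler
-- what changed: Replace the is_numeric_array pre-scan (linear 'str(i) not in keys' list searches) plus a second index-walking while loop with one EAFP pass: try [o[str(i)] for i in range(len(o))] and fall back to list(o.values()) on KeyError.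
import Mathlib
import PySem

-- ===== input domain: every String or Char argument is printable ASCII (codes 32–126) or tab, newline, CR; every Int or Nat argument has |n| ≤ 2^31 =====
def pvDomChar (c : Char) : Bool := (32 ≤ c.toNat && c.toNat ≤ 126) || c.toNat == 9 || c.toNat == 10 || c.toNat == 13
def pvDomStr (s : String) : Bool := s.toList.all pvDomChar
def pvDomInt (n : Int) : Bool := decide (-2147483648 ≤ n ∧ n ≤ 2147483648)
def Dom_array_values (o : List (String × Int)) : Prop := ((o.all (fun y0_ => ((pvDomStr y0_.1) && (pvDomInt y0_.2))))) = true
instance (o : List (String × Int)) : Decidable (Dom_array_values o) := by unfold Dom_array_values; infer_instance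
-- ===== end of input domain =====

-- B replaces A's is_numeric_array pre-scan + second index loop by one EAFP pass (try the
-- indexed lookups, fall back to the values list); objective: simpler.
-- The argument here is the dict case of the Python (a dict[str,int] as an association list).

-- ===== PORT A =====
-- array_keys(o) for a dict: list(o.keys())
def array_keys_A (d : PySem.Dict String Int) : List String := d.keys

-- is_numeric_array(o) for a dict: while loop 'if str(i) not in k: return False'
def is_numeric_array_A (d : PySem.Dict String Int) : Bool :=
  let k := array_keys_A d
  (PySem.List.pyRange 0 k.length 1).all (fun i => decide (PySem.Int.toStr i ∈ k))

-- while loop building v by ascending index; o[str(i)] is guarded by is_numeric_array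
def array_values (o : List (String × Int)) : List Int :=
  let d := PySem.Dict.mk o
  if is_numeric_array_A d then
    (PySem.List.pyRange 0 d.size 1).map (fun i => (d.get? (PySem.Int.toStr i)).getD 0)
  else
    d.values

-- ===== PORT B =====
-- the try-comprehension: none = the KeyError path
def avTry (d : PySem.Dict String Int) : List Int → Option (List Int)
  | [] => some []
  | i :: rest =>
    match d.get? (PySem.Int.toStr i) with
    | none => none
    | some v => (avTry d rest).map (v :: ·)

def array_values_alt (o : List (String × Int)) : List Int :=
  let d := PySem.Dict.mk o
  match avTry d (PySem.List.pyRange 0 d.size 1) with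
  | some v => v
  | none => d.values

-- ===== PRECONDITION & SPEC =====
def Spec_array_values (o : List (String × Int)) (out : List Int) : Prop := out = array_values_alt o
instance (o : List (String × Int)) (out : List Int) : Decidable (Spec_array_values o out) := by unfold Spec_array_values; infer_instance

-- ===== CLAIM (what is proved, stated in full; the proofs are below) =====
def Claim_equal_array_values : Prop := ∀ (o : List (String × Int)), Dom_array_values o → Spec_array_values o (array_values o)

-- ===== LEMMAS AND PROOFS =====

-- B's try-comprehension succeeds exactly when every lookup succeeds, and then returns the same
-- list A's guarded index loop builds.
theorem avTry_spec (d : PySem.Dict String Int) (l : List Int) :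
    avTry d l =
      if l.all (fun i => (d.get? (PySem.Int.toStr i)).isSome) then
        some (l.map (fun i => (d.get? (PySem.Int.toStr i)).getD 0))
      else none := by
  induction l with
  | nil => rfl
  | cons i rest ih =>
    simp only [avTry, List.all_cons, List.map_cons]
    cases h : d.get? (PySem.Int.toStr i) with
    | none => simp
    | some v => rw [ih]; simp only [Option.isSome_some, Bool.true_and]; split_ifs <;> simp

-- A's membership test 'str(i) in keys' is B's 'get? isSome'
theorem mem_keys_iff_isSome (d : PySem.Dict String Int) (k : String) :
    decide (k ∈ d.keys) = (d.get? k).isSome := by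
  rw [← PySem.Dict.contains_eq_decide_mem_keys, PySem.Dict.contains_eq_isSome_get?]

-- ===== VERDICT (by name: the statement is the Claim_ definition above) =====
theorem array_values_spec : Claim_equal_array_values := by
  intro o _
  unfold Spec_array_values array_values array_values_alt is_numeric_array_A array_keys_A
  simp only [avTry_spec]
  have hlen : (PySem.Dict.mk o).keys.length = (PySem.Dict.mk o).size := by
    simp [PySem.Dict.keys, PySem.Dict.size]
  simp only [hlen, mem_keys_iff_isSome]
  split_ifs <;> simp_all
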